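-- pv_equiv track=rewrite | github.com/SrijaAdhya12/python-programs | accenture/sandwich.py | find_bread
-- ===== SOURCE A (Python) =====
-- def find_bread(s):
--     stack = []
--     res = ""
--
--     for ch in s:
--         if stack and ch == stack[0]:
--             res += ch
--             stack.clear()
--         else:
--             stack.append(ch)
--
--     return res
-- ===== SOURCE B (Python) =====
-- def find_bread(s):
--     res = []
--     i = 0
--     n = len(s)
--     while i < n:
--         c = s[i]
--         j = i + 1
--         while j < n and s[j] != c:
--             j += 1
--         if j == n:
--             break
--         res.append(c)
--         i = j + 1
--     return "".join(res)
-- ===== Notes on version B (the rewrite author's own statement) =====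
-- stated objective: alternative
-- what changed: Replaces the stack-accumulating fold (push every char, compare against stack[0], clear on match) by an index-based two-pointer scan: the group's first char is looked up by an inner scan for its next occurrence, emitting it and jumping past the match; no stack is maintained.
import Mathlib
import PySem

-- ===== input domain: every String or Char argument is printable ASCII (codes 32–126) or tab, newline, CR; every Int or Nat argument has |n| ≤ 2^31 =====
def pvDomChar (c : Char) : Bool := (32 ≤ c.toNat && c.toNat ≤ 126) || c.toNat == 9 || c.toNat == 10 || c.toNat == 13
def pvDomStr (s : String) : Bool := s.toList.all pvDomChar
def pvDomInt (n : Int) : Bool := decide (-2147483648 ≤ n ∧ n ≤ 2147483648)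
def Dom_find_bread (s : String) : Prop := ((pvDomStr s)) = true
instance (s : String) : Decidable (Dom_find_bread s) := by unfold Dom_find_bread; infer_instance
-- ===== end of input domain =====

-- B replaces A's stack-accumulating fold by an index-based two-pointer scan (alternative decomposition, same cost).

-- ===== PORT A =====
-- one step of A's for-loop over state (stack, res): 'if stack and ch == stack[0]: res += ch; stack.clear() else: stack.append(ch)'
def aStep (acc : List Char × List Char) (ch : Char) : List Char × List Char :=
  match acc.1.head? with
  | some c => if ch == c then ([], acc.2 ++ [ch]) else (acc.1 ++ [ch], acc.2)
  | none => (acc.1 ++ [ch], acc.2)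

def find_bread (s : String) : String :=
  ((s.toList.foldl aStep ([], [])).2).asString

-- ===== PORT B =====
-- inner while loop: scan for the next occurrence of c, returning the remainder after it (none = reached the end)
def bScan (c : Char) : List Char → Option (List Char)
  | [] => none
  | x :: xs => if x == c then some xs else bScan c xs

theorem bScan_length {c : Char} : ∀ {l rest : List Char}, bScan c l = some rest → rest.length < l.length
  | [], _, h => by simp [bScan] at h
  | x :: xs, rest, h => by
    by_cases hx : x == c
    · simp [bScan, hx] at h; subst h; simp
    · simp [bScan, hx] at h
      exact Nat.lt_trans (bScan_length h) (by simp)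

-- outer while loop: take the group's first char, scan for its match, emit it and continue past the match
def bGo : List Char → List Char
  | [] => []
  | c :: rest =>
    match h : bScan c rest with
    | none => []
    | some rest' => c :: bGo rest'
termination_by l => l.length
decreasing_by exact Nat.lt_trans (bScan_length h) (by simp)

def find_bread_alt (s : String) : String := (bGo s.toList).asString

-- ===== PRECONDITION & SPEC =====
def Spec_find_bread (s : String) (out : String) : Prop := out = find_bread_alt s
instance (s : String) (out : String) : Decidable (Spec_find_bread s out) := by unfold Spec_find_bread; infer_instance

-- ===== CLAIM (what is proved, stated in full; the proofs are below) =====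
def Claim_equal_find_bread : Prop := ∀ (s : String), Dom_find_bread s → Spec_find_bread s (find_bread s)

-- ===== LEMMAS AND PROOFS =====

-- bGo unfolded on a cons, with the inner dependent match flattened
theorem bGo_cons (c : Char) (rest : List Char) :
    bGo (c :: rest) = match bScan c rest with | none => [] | some r => c :: bGo r := by
  rw [bGo.eq_def]
  split
  · rename_i h; cases h
  · rename_i x xs h
    injection h with h1 h2
    subst h1; subst h2
    split <;> rename_i h' <;> rw [h']

-- A's loop result ignores everything on the stack below its first element
theorem foldl_aStep_head : ∀ (l : List Char) (c : Char) (st res : List Char),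
    (l.foldl aStep (c :: st, res)).2 = (l.foldl aStep ([c], res)).2 := by
  intro l
  induction l with
  | nil => intro c st res; rfl
  | cons ch l ih =>
    intro c st res
    by_cases h : ch == c
    · simp [List.foldl, aStep, h]
    · simp only [List.foldl, aStep, List.head?, h, Bool.false_eq_true, if_false]
      simp only [List.cons_append, List.nil_append]
      rw [ih c (st ++ [ch]) res, ih c [ch] res]

-- running A's loop with a one-element stack [c] is B's inner scan for c
theorem foldl_aStep_single : ∀ (l : List Char) (c : Char) (res : List Char),
    (l.foldl aStep ([c], res)).2 =
      match bScan c l with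
      | none => res
      | some rest' => (rest'.foldl aStep ([], res ++ [c])).2 := by
  intro l
  induction l with
  | nil => intro c res; rfl
  | cons x l ih =>
    intro c res
    by_cases h : x == c
    · have hx : x = c := by exact (beq_iff_eq).1 h
      simp [List.foldl, aStep, bScan, hx]
    · simp only [List.foldl, aStep, List.head?, h, Bool.false_eq_true, if_false, bScan]
      simp only [List.cons_append, List.nil_append]
      rw [foldl_aStep_head l c [x] res, ih c res]

-- from the empty stack, A's loop computes B's outer scan
theorem foldl_aStep_bGo : ∀ (l res : List Char),
    (l.foldl aStep ([], res)).2 = res ++ bGo l := by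
  intro l
  induction hn : l.length using Nat.strong_induction_on generalizing l with
  | _ n ih =>
    match l with
    | [] => intro res; simp [bGo]
    | c :: rest =>
      intro res
      have step : (((c :: rest).foldl aStep ([], res))).2 = (rest.foldl aStep ([c], res)).2 := by
        simp [List.foldl, aStep]
      rw [step, foldl_aStep_single rest c res, bGo_cons]
      match h : bScan c rest with
      | none => simp
      | some rest' =>
        have hlt : rest'.length < n := by
          subst hn
          exact Nat.lt_trans (bScan_length h) (by simp)
        simp only
        rw [ih rest'.length hlt rest' rfl (res ++ [c])]
        simp

-- ===== VERDICT (by name: the statement is the Claim_ definition above) =====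
theorem find_bread_spec : Claim_equal_find_bread := by
  intro s _
  unfold Spec_find_bread find_bread find_bread_alt
  rw [foldl_aStep_bGo]
  simp
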